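-- pv_equiv track=rewrite | github.com/resoltico/FTLLexEngine | src/ftllexengine/parsing/numbers.py | _validate_group_positions
-- ===== SOURCE A (Python) =====
-- def _validate_group_positions(
--     value: str,
--     group_sep: str,
--     decimal_sep: str,
--     primary_group: int,
--     secondary_group: int,
-- ) -> bool:
--     """Return True if group separators appear at correct digit-boundary positions.
--
--     Babel's parse_decimal strips group separators without validating their
--     positions: "1,2,3" passes through as Decimal("123") for en_US. This guard
--     rejects inputs where non-leftmost groups have an unexpected digit count.
--
--     Args:
--         value: Raw input string.
--         group_sep: Locale's thousands separator character.
--         decimal_sep: Locale's decimal separator character.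
--         primary_group: Expected digit count for the rightmost mandatory group.
--         secondary_group: Expected digit count for all other non-leftmost groups.
--     """
--     int_part = value.split(decimal_sep, maxsplit=1)[0] if decimal_sep in value else value
--     int_part = int_part.lstrip("+-").strip()
--     if group_sep not in int_part:
--         return True
--     groups = int_part.split(group_sep)
--     # Non-digit content means Babel will reject the input independently;
--     # skip grouping check to avoid duplicate error reporting.
--     if not all(g.isdigit() for g in groups):
--         return True
--     # Rightmost non-leftmost group must have exactly primary_group digits.
--     if len(groups[-1]) != primary_group:
--         return False
--     # Middle groups (between leftmost and rightmost) must have secondary_group digits.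
--     for group in groups[1:-1]:
--         if len(group) != secondary_group:
--             return False
--     # Leftmost group may have 1..secondary_group digits.
--     return 1 <= len(groups[0]) <= secondary_group
-- ===== SOURCE B (Python) =====
-- def _validate_group_positions(
--     value: str,
--     group_sep: str,
--     decimal_sep: str,
--     primary_group: int,
--     secondary_group: int,
-- ) -> bool:
--     """Single left-to-right scan: measure separator-delimited segment lengths and
--     digit-purity in one pass instead of splitting into a list of group strings."""
--     int_part = value.split(decimal_sep, maxsplit=1)[0] if decimal_sep in value else value
--     int_part = int_part.lstrip("+-").strip()
--     if group_sep not in int_part: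
--         return True
--     # One pass: collect segment lengths; track whether every non-separator char is a digit.
--     lengths = []
--     cur = 0
--     clean = True
--     i = 0
--     n = len(int_part)
--     m = len(group_sep)
--     while i < n:
--         if int_part.startswith(group_sep, i):
--             lengths.append(cur)
--             cur = 0
--             i += m
--         else:
--             if not int_part[i].isdigit():
--                 clean = False
--             cur += 1
--             i += 1
--     lengths.append(cur)
--     # Non-digit content (including an empty segment) means Babel rejects independently.
--     if not clean or 0 in lengths:
--         return True
--     if lengths[-1] != primary_group:
--         return False
--     if any(length != secondary_group for length in lengths[1:-1]):
--         return False
--     return 1 <= lengths[0] <= secondary_group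
-- ===== Notes on version B (the rewrite author's own statement) =====
-- stated objective: alternative
-- what changed: Replaces A's split-into-a-list-of-group-strings plus per-group isdigit()/indexing checks by a single left-to-right character scan that accumulates segment lengths and one digit-purity flag, then validates the length list.
import Mathlib
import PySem

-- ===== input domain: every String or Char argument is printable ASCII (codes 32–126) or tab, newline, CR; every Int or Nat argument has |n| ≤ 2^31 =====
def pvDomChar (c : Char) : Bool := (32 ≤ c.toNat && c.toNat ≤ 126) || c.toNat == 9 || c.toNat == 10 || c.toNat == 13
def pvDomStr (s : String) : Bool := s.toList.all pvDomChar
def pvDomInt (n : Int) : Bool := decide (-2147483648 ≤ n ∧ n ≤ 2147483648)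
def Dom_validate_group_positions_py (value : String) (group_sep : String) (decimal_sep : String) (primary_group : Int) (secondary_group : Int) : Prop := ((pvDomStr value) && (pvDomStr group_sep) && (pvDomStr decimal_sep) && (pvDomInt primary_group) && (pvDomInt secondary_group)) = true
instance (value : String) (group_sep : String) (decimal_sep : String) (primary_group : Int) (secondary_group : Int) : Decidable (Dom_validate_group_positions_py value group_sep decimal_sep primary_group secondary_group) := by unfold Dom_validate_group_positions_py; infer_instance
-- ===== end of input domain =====

-- B replaces A's split-into-group-strings plus per-group isdigit/length checks by one
-- left-to-right scan collecting segment lengths and a digit-purity flag (objective: alternative).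
-- Both versions' Python raises ValueError when a separator is the empty string; Pre_ excludes that.

-- ===== PORT A =====
-- int_part = value.split(decimal_sep, maxsplit=1)[0] if decimal_sep in value else value
-- int_part = int_part.lstrip("+-").strip()
def pvIntPart (value : List Char) (decimal_sep : List Char) : List Char :=
  let int_part0 :=
    if PySem.Chars.isIn decimal_sep value then
      match PySem.Chars.splitMax? value decimal_sep 1 with
      | some parts => parts.headD []
      | none => []  -- unreachable under Pre_: Python raises ValueError for decimal_sep = ""
    else value
  -- .lstrip("+-") ported by hand (exact: drops leading '+'/'-' chars), then .strip()
  PySem.Chars.strip (int_part0.dropWhile (fun c => c == '+' || c == '-'))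

def validate_group_positions_py (value : String) (group_sep : String) (decimal_sep : String) (primary_group : Int) (secondary_group : Int) : Bool :=
  let gs := group_sep.toList
  let int_part := pvIntPart value.toList decimal_sep.toList
  if !(PySem.Chars.isIn gs int_part) then true
  else
    match gs with
    | [] => false  -- unreachable under Pre_: Python split('') raises ValueError
    | _ :: _ =>
      let groups := PySem.Chars.splitOn int_part gs
      if !(groups.all PySem.Chars.strIsdigit) then true
      else if ((((PySem.List.pyGet? groups (-1)).getD []).length : Int) ≠ primary_group) then false
      else if !((PySem.List.slice groups (some 1) (some (-1))).all
                  (fun g => ((g.length : Int) == secondary_group))) then false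
      else decide (1 ≤ (((PySem.List.pyGet? groups 0).getD []).length : Int) ∧
                   (((PySem.List.pyGet? groups 0).getD []).length : Int) ≤ secondary_group)

-- ===== PORT B =====
-- the while-loop of Source B: scan int_part left to right; on a separator match close the
-- current segment (append its length, advance by len(group_sep)); otherwise update the
-- digit-purity flag and extend the current segment.  Returns (lengths, clean).
def pvScanB (g0 : Char) (gr : List Char) : List Char → Nat → Bool → List Nat × Bool
  | [], cur, clean => ([cur], clean)
  | c :: rest, cur, clean =>
    if (g0 :: gr).isPrefixOf (c :: rest) then
      let r := pvScanB g0 gr (rest.drop gr.length) 0 clean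
      (cur :: r.1, r.2)
    else
      pvScanB g0 gr rest (cur + 1) (clean && PySem.Chars.isdigit c)
  termination_by l _ _ => l.length
  decreasing_by all_goals (simp only [List.length_drop, List.length_cons]; omega)

def validate_group_positions_py_alt (value : String) (group_sep : String) (decimal_sep : String) (primary_group : Int) (secondary_group : Int) : Bool :=
  let gs := group_sep.toList
  let int_part := pvIntPart value.toList decimal_sep.toList
  if !(PySem.Chars.isIn gs int_part) then true
  else
    match gs with
    | [] => true  -- unreachable under Pre_: Source B's while-loop does not terminate for group_sep = ""
    | g0 :: gr =>
      let r := pvScanB g0 gr int_part 0 true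
      let lengths := r.1
      let clean := r.2
      if !clean || lengths.contains 0 then true
      else if (((PySem.List.pyGet? lengths (-1)).getD 0 : Int) ≠ primary_group) then false
      else if (PySem.List.slice lengths (some 1) (some (-1))).any
                (fun L => !((L : Int) == secondary_group)) then false
      else decide (1 ≤ ((PySem.List.pyGet? lengths 0).getD 0 : Int) ∧
                   ((PySem.List.pyGet? lengths 0).getD 0 : Int) ≤ secondary_group)

-- ===== PRECONDITION & SPEC =====
-- Pre_ excludes exactly the inputs where A raises ValueError: an empty decimal_sep
-- (str.split('') raises) or an empty group_sep (reached whenever '' in int_part, always true).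
def Pre_validate_group_positions_py (value : String) (group_sep : String) (decimal_sep : String) (primary_group : Int) (secondary_group : Int) : Prop :=
  group_sep ≠ "" ∧ decimal_sep ≠ ""
instance (value : String) (group_sep : String) (decimal_sep : String) (primary_group : Int) (secondary_group : Int) : Decidable (Pre_validate_group_positions_py value group_sep decimal_sep primary_group secondary_group) := by unfold Pre_validate_group_positions_py; infer_instance

def pvWitness_validate_group_positions_py : String × String × String × Int × Int := ("1,234", ",", ".", 3, 2)

def Spec_validate_group_positions_py (value : String) (group_sep : String) (decimal_sep : String) (primary_group : Int) (secondary_group : Int) (out : Bool) : Prop := out = validate_group_positions_py_alt value group_sep decimal_sep primary_group secondary_group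
instance (value : String) (group_sep : String) (decimal_sep : String) (primary_group : Int) (secondary_group : Int) (out : Bool) : Decidable (Spec_validate_group_positions_py value group_sep decimal_sep primary_group secondary_group out) := by unfold Spec_validate_group_positions_py; infer_instance

-- ===== CLAIM (what is proved, stated in full; the proofs are below) =====
def Claim_equal_validate_group_positions_py : Prop := ∀ (value : String) (group_sep : String) (decimal_sep : String) (primary_group : Int) (secondary_group : Int), Dom_validate_group_positions_py value group_sep decimal_sep primary_group secondary_group → Pre_validate_group_positions_py value group_sep decimal_sep primary_group secondary_group → Spec_validate_group_positions_py value group_sep decimal_sep primary_group secondary_group (validate_group_positions_py value group_sep decimal_sep primary_group secondary_group)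

-- ===== LEMMAS AND PROOFS =====

-- canonical "segments" of a char list w.r.t. the nonempty separator g0::gr:
-- first segment plus the list of later segments (mirrors str.split's greedy scan).
def pvSegs (g0 : Char) (gr : List Char) : List Char → List Char × List (List Char)
  | [] => ([], [])
  | c :: rest =>
    if (g0 :: gr).isPrefixOf (c :: rest) then
      let r := pvSegs g0 gr (rest.drop gr.length)
      ([], r.1 :: r.2)
    else
      let r := pvSegs g0 gr rest
      (c :: r.1, r.2)
  termination_by l => l.length
  decreasing_by all_goals (simp only [List.length_drop, List.length_cons]; omega)

theorem pvSplitOn_go_eq (g0 : Char) (gr : List Char) :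
    ∀ (fuel : Nat) (l cur : List Char) (acc : List (List Char)), l.length < fuel →
      PySem.Chars.splitOn.go (g0 :: gr) fuel l cur acc =
        acc.reverse ++ ((cur.reverse ++ (pvSegs g0 gr l).1) :: (pvSegs g0 gr l).2) := by
  intro fuel
  induction fuel with
  | zero => intro l cur acc h; omega
  | succ fuel ih =>
    intro l cur acc h
    cases l with
    | nil => simp [PySem.Chars.splitOn.go, pvSegs]
    | cons c rest =>
      rw [PySem.Chars.splitOn.go, pvSegs]
      by_cases hp : (g0 :: gr).isPrefixOf (c :: rest)
      · rw [if_pos hp, if_pos hp]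
        have hlen : (List.drop (g0 :: gr).length (c :: rest)) = rest.drop gr.length := by
          simp [List.drop_succ_cons]
        rw [hlen, ih _ _ _ (by simp at h ⊢; omega)]
        simp
      · rw [if_neg hp, if_neg hp]
        rw [ih _ _ _ (by simp at h ⊢; omega)]
        simp

theorem pvSplitOn_eq (g0 : Char) (gr : List Char) (l : List Char) :
    PySem.Chars.splitOn l (g0 :: gr) = (pvSegs g0 gr l).1 :: (pvSegs g0 gr l).2 := by
  rw [PySem.Chars.splitOn, pvSplitOn_go_eq g0 gr _ _ _ _ (by omega)]
  simp

theorem pvScanB_eq (g0 : Char) (gr : List Char) :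
    ∀ (l : List Char) (cur : Nat) (clean : Bool),
      pvScanB g0 gr l cur clean =
        ((cur + (pvSegs g0 gr l).1.length) :: (pvSegs g0 gr l).2.map List.length,
         clean && (pvSegs g0 gr l).1.all PySem.Chars.isdigit
               && (pvSegs g0 gr l).2.all (fun g => g.all PySem.Chars.isdigit)) := by
  intro l
  induction l using pvSegs.induct g0 gr with
  | case1 => intro cur clean; simp [pvScanB, pvSegs]
  | case2 c rest hp ih =>
    intro cur clean
    rw [pvScanB, if_pos hp, ih]
    rw [pvSegs, if_pos hp]
    simp [Bool.and_assoc]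
  | case3 c rest hp ih =>
    intro cur clean
    rw [pvScanB, if_neg hp, ih]
    rw [pvSegs, if_neg hp]
    refine Prod.ext ?_ ?_
    · simp; omega
    · simp [Bool.and_assoc]

theorem pvPyGet?_map {α β : Type} (f : α → β) (l : List α) (i : Int) :
    PySem.List.pyGet? (l.map f) i = (PySem.List.pyGet? l i).map f := by
  simp [PySem.List.pyGet?, List.length_map]

theorem pvSlice_map {α β : Type} (f : α → β) (l : List α) (a b : Option Int) :
    PySem.List.slice (l.map f) a b = (PySem.List.slice l a b).map f := by
  simp [PySem.List.slice, List.length_map, List.map_take, List.map_drop]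

theorem pvAllDigit_eq (groups : List (List Char)) :
    groups.all PySem.Chars.strIsdigit =
      (groups.all (fun g => g.all PySem.Chars.isdigit) && !((groups.map List.length).contains 0)) := by
  induction groups with
  | nil => simp
  | cons g gs ih =>
    simp only [List.all_cons, List.map_cons, List.contains_cons, ih]
    cases g <;> simp [PySem.Chars.strIsdigit, Bool.and_assoc]

-- ===== VERDICT (by name: the statement is the Claim_ definition above) =====
theorem pvGetDLen (o : Option (List Char)) : ((o.map List.length).getD 0 : Int) = ((o.getD []).length : Int) := by
  cases o <;> simp

theorem validate_group_positions_py_spec : Claim_equal_validate_group_positions_py := by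
  intro value group_sep decimal_sep primary_group secondary_group _ hpre
  obtain ⟨hgs, -⟩ := hpre
  unfold Spec_validate_group_positions_py validate_group_positions_py validate_group_positions_py_alt
  cases hg : group_sep.toList with
  | nil =>
    exact absurd (String.toList_eq_nil_iff.mp hg) hgs
  | cons g0 gr =>
    by_cases hin : PySem.Chars.isIn (g0 :: gr) (pvIntPart value.toList decimal_sep.toList)
    · simp only [hin, Bool.not_true, Bool.false_eq_true, if_false]
      rw [pvSplitOn_eq, pvScanB_eq]
      set h := (pvSegs g0 gr (pvIntPart value.toList decimal_sep.toList)).1 with hh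
      set t := (pvSegs g0 gr (pvIntPart value.toList decimal_sep.toList)).2 with ht
      simp only [Nat.zero_add, Bool.true_and]
      have hmap : (h.length :: List.map List.length t) = List.map List.length (h :: t) := rfl
      rw [hmap, pvPyGet?_map, pvPyGet?_map, pvSlice_map, pvAllDigit_eq]
      simp only [List.any_map, pvGetDLen]
      simp [Bool.not_and, Bool.not_not, List.any_eq_not_all_not]
    · simp [hin]
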